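-- pv_equiv track=rewrite | github.com/Brandon-Valley/quick_serial_number | quick_sn/main.py | build_sn_list
-- ===== SOURCE A (Python) =====
-- EXAMPLE_SN = '0243 8405 0296 3935 9212 2008'
--
-- def valid_sn(pot_sn):
--     if len(pot_sn) != len(EXAMPLE_SN):
--         return False
--
--     for char_num in range(len(pot_sn)):
--         cur_char = pot_sn[char_num]
--
--         if cur_char.isdigit() == False and cur_char != ' ':
--             return False
--
--         if cur_char.isdigit() != EXAMPLE_SN[char_num].isdigit():
--             return False
--     return True
--
-- def build_sn_list(in_str):
--     sn_list = []
--     for char_num in range(len(in_str)):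
--         char = in_str[char_num]
--         if char.isdigit() and ( len(in_str) - char_num ) >= len(EXAMPLE_SN):
--             potential_sn = in_str[char_num : char_num + len(EXAMPLE_SN)]
--             if valid_sn(potential_sn):
--                 sn_list.append(potential_sn)
--     return sn_list
-- ===== SOURCE B (Python) =====
-- EXAMPLE_SN = '0243 8405 0296 3935 9212 2008'
--
--
-- def build_sn_list(in_str):
--     # Classify each char once ('D' digit, ' ' space, 'X' other), then find every
--     # (possibly overlapping) occurrence of the fixed mask of EXAMPLE_SN in it.
--     mask = ''.join('D' if c.isdigit() else (' ' if c == ' ' else 'X') for c in in_str)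
--     target = ''.join('D' if c.isdigit() else ' ' for c in EXAMPLE_SN)
--     sns = []
--     pos = mask.find(target, 0)
--     while pos != -1:
--         sns.append(in_str[pos:pos + len(EXAMPLE_SN)])
--         pos = mask.find(target, pos + 1)
--     return sns
-- ===== Notes on version B (the rewrite author's own statement) =====
-- stated objective: idiomatic
-- what changed: Instead of testing each start index with a per-candidate 29-char validation loop, B maps the whole string once to a classification mask ('D'/' '/'X') and enumerates overlapping occurrences of the fixed mask of EXAMPLE_SN with a str.find loop, slicing the original string at each hit.
import Mathlib
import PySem

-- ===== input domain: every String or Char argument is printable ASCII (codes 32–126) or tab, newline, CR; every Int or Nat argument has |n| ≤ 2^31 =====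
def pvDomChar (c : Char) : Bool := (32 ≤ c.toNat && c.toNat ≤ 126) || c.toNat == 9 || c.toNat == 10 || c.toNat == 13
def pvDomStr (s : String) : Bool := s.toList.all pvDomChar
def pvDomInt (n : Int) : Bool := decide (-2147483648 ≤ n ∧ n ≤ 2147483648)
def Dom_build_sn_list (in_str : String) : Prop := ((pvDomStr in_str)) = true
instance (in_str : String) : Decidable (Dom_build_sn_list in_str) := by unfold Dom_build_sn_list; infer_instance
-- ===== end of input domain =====

-- B classifies every char once ('D'/' '/'X') and finds the fixed mask of EXAMPLE_SN with an
-- overlapping find loop; same return values as A, objective: idiomatic single mask search.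

def EXAMPLE_SN : String := "0243 8405 0296 3935 9212 2008"

-- Python's str.isdigit() on a single char; exact on the ASCII input domain
def pyDigit (c : Char) : Bool := c.isDigit

-- ===== PORT A =====
-- the index loop of valid_sn, walking both strings in step (early returns = base cases)
def valid_sn_loop : List Char → List Char → Bool
  | cur :: cs, ex :: es =>
    if pyDigit cur = false && cur != ' ' then false
    else if pyDigit cur != pyDigit ex then false
    else valid_sn_loop cs es
  | _, _ => true

def valid_sn (pot_sn : String) : Bool :=
  if pot_sn.length ≠ EXAMPLE_SN.length then false
  else valid_sn_loop pot_sn.toList EXAMPLE_SN.toList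

def build_sn_list (in_str : String) : List String :=
  let s := in_str.toList
  (List.range s.length).foldl
    (fun sn_list char_num =>
      let char := s.getD char_num ' '   -- char_num < len, always in range
      if pyDigit char && decide (s.length - char_num ≥ EXAMPLE_SN.length) then
        let potential_sn := String.ofList (PySem.List.slice s (some (char_num : Int))
          (some ((char_num : Int) + (EXAMPLE_SN.length : Int))))
        if valid_sn potential_sn then sn_list ++ [potential_sn] else sn_list
      else sn_list) []

-- ===== PORT B =====
def classifyChar (c : Char) : Char := if pyDigit c then 'D' else if c = ' ' then ' ' else 'X'

def targetMask : List Char := EXAMPLE_SN.toList.map (fun c => if pyDigit c then 'D' else ' ')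

-- the while loop of Source B; fuel only makes it total (each step advances pos by at least 1)
def snFindLoop (s mask : List Char) (pos : Nat) : Nat → List String
  | 0 => []
  | fuel + 1 =>
    let j := PySem.Chars.findFrom mask targetMask (pos : Int) none
    if j = -1 then []
    else String.ofList (PySem.List.slice s (some j) (some (j + (EXAMPLE_SN.length : Int)))) ::
         snFindLoop s mask (j.toNat + 1) fuel

def build_sn_list_alt (in_str : String) : List String :=
  let s := in_str.toList
  let mask := s.map classifyChar
  snFindLoop s mask 0 (s.length + 1)

-- ===== PRECONDITION & SPEC =====
def Spec_build_sn_list (in_str : String) (out : List String) : Prop := out = build_sn_list_alt in_str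
instance (in_str : String) (out : List String) : Decidable (Spec_build_sn_list in_str out) := by unfold Spec_build_sn_list; infer_instance

-- ===== CLAIM (what is proved, stated in full; the proofs are below) =====
def Claim_equal_build_sn_list : Prop := ∀ (in_str : String), Dom_build_sn_list in_str → Spec_build_sn_list in_str (build_sn_list in_str)

-- ===== LEMMAS AND PROOFS =====

def tclass (c : Char) : Char := if pyDigit c then 'D' else ' '

def sliceStr (s : List Char) (i : Nat) : String :=
  String.ofList (PySem.List.slice s (some (i : Int)) (some ((i : Int) + (EXAMPLE_SN.length : Int))))

lemma valid_sn_loop_iff (cs es : List Char) (h : cs.length = es.length) :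
    valid_sn_loop cs es = true ↔ cs.map classifyChar = es.map tclass := by
  induction cs generalizing es with
  | nil => cases es with
    | nil => simp [valid_sn_loop]
    | cons e es => simp at h
  | cons c cs ih =>
    cases es with
    | nil => simp at h
    | cons e es =>
      simp only [List.length_cons, Nat.add_right_cancel_iff] at h
      by_cases hc : pyDigit c = true <;> by_cases he : pyDigit e = true <;>
        simp [valid_sn_loop, classifyChar, tclass, hc, he, ih es h] <;>
        by_cases hsp : c = ' ' <;> simp [hsp]

lemma targetMask_eq : targetMask = EXAMPLE_SN.toList.map tclass := by
  simp [targetMask, tclass]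

lemma valid_sn_iff (pot : String) :
    valid_sn pot = true ↔ pot.toList.length = 29 ∧ pot.toList.map classifyChar = targetMask := by
  have hlen : EXAMPLE_SN.toList.length = 29 := by decide
  unfold valid_sn
  split_ifs with h
  · constructor
    · intro hh; simp at hh
    · rintro ⟨h1, -⟩
      have h1' : pot.length = 29 := by simpa using h1
      exact h (h1'.trans (by decide))
  · have h' : pot.length = EXAMPLE_SN.length := not_ne_iff.mp h
    have hlent : pot.toList.length = EXAMPLE_SN.toList.length := by
      simp only [String.length_toList]; exact h'
    rw [valid_sn_loop_iff _ _ hlent, targetMask_eq]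
    constructor
    · intro hm; exact ⟨hlent.trans hlen, hm⟩
    · rintro ⟨-, hm⟩; exact hm

lemma sliceStr_toList (s : List Char) (i : Nat) :
    (sliceStr s i).toList = (s.drop i).take 29 := by
  have h1 : ((i : Int) + (EXAMPLE_SN.length : Int)) = (((i + 29 : Nat)) : Int) := by
    rw [show EXAMPLE_SN.length = 29 from by decide]; push_cast; ring
  unfold sliceStr
  rw [h1, PySem.List.slice_natCast, String.toList_ofList]
  congr 1
  omega

lemma prefix29_iff (s : List Char) (i : Nat) :
    targetMask <+: (s.map classifyChar).drop i ↔
      ((s.drop i).take 29).map classifyChar = targetMask := by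
  rw [List.prefix_iff_eq_take, show targetMask.length = 29 from by decide,
    ← List.map_drop, ← List.map_take, eq_comm]

lemma prefix29_length_le (s : List Char) (i : Nat)
    (h : targetMask <+: (s.map classifyChar).drop i) : i + 29 ≤ s.length := by
  have h1 := h.length_le
  have h2 : targetMask.length = 29 := by decide
  simp only [h2, List.length_drop, List.length_map] at h1
  omega

lemma prefix29_digit (s : List Char) (i : Nat)
    (h : targetMask <+: (s.map classifyChar).drop i) : pyDigit (s.getD i ' ') = true := by
  have hle := prefix29_length_le s i h
  rw [prefix29_iff] at h
  have h0 : (((s.drop i).take 29).map classifyChar)[0]? = some 'D' := by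
    rw [h]; decide
  rw [List.getElem?_map] at h0
  have hget : ((s.drop i).take 29)[0]? = s[i]? := by
    rw [List.getElem?_take, if_pos (by omega), List.getElem?_drop]
    simp
  rw [hget] at h0
  rw [List.getD_eq_getElem?_getD]
  cases hx : s[i]? with
  | none => rw [List.getElem?_eq_none_iff] at hx; omega
  | some c =>
    rw [hx] at h0
    simp only [Option.map_some, Option.some.injEq] at h0
    simp only [Option.getD_some]
    by_contra hd
    simp only [Bool.not_eq_true] at hd
    simp only [classifyChar, hd, Bool.false_eq_true, if_false] at h0
    split_ifs at h0 <;> exact absurd h0 (by decide)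

-- A's per-index guard is exactly "the mask matches at i"
lemma guard_eq (s : List Char) (i : Nat) :
    ((pyDigit (s.getD i ' ') && decide (s.length - i ≥ EXAMPLE_SN.length)) &&
       valid_sn (sliceStr s i)) =
      decide (targetMask <+: (s.map classifyChar).drop i) := by
  rw [Bool.eq_iff_iff, decide_eq_true_eq]
  have h29 : EXAMPLE_SN.length = 29 := by decide
  constructor
  · rintro h
    simp only [Bool.and_eq_true, decide_eq_true_eq] at h
    obtain ⟨⟨-, -⟩, hv⟩ := h
    rw [valid_sn_iff, sliceStr_toList] at hv
    rw [prefix29_iff]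
    exact hv.2
  · intro h
    have hle := prefix29_length_le s i h
    have hd := prefix29_digit s i h
    rw [prefix29_iff] at h
    simp only [Bool.and_eq_true, decide_eq_true_eq]
    refine ⟨⟨hd, by omega⟩, ?_⟩
    rw [valid_sn_iff, sliceStr_toList]
    exact ⟨by simp; omega, h⟩

lemma body_eq (s : List Char) (acc : List String) (i : Nat) :
    (let char := s.getD i ' '
     if pyDigit char && decide (s.length - i ≥ EXAMPLE_SN.length) then
       let potential_sn := String.ofList (PySem.List.slice s (some (i : Int))
         (some ((i : Int) + (EXAMPLE_SN.length : Int))))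
       if valid_sn potential_sn then acc ++ [potential_sn] else acc
     else acc) =
    if decide (targetMask <+: (s.map classifyChar).drop i) then acc ++ [sliceStr s i]
    else acc := by
  show (if pyDigit (s.getD i ' ') && decide (s.length - i ≥ EXAMPLE_SN.length) then
          if valid_sn (sliceStr s i) then acc ++ [sliceStr s i] else acc
        else acc) = _
  rw [← guard_eq s i]
  cases h1 : (pyDigit (s.getD i ' ') && decide (s.length - i ≥ EXAMPLE_SN.length)) <;>
    cases h2 : valid_sn (sliceStr s i) <;> simp

lemma build_sn_list_eq_filter (in_str : String) :
    build_sn_list in_str =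
      ((List.range in_str.toList.length).filter
        (fun i => decide (targetMask <+: (in_str.toList.map classifyChar).drop i))).map
        (sliceStr in_str.toList) := by
  unfold build_sn_list
  refine (PySem.List.foldl_congr_mem _ _
      (fun acc i => if decide (targetMask <+: (in_str.toList.map classifyChar).drop i) then
          acc ++ [sliceStr in_str.toList i] else acc)
      [] (fun acc i _ => body_eq in_str.toList acc i)).trans ?_
  rw [PySem.List.foldl_append_if]
  simp

lemma prefix_drop_infix {t l : List Char} {k : Nat} (h : t <+: l.drop k) : t <:+: l :=
  h.isInfix.trans (List.drop_suffix k l).isInfix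

lemma snFindLoop_eq (s mask : List Char) (pos fuel : Nat) (hpos : pos ≤ mask.length)
    (hfuel : mask.length + 1 - pos ≤ fuel) :
    snFindLoop s mask pos fuel =
      ((List.range' pos (mask.length - pos)).filter
        (fun i => decide (targetMask <+: mask.drop i))).map (sliceStr s) := by
  induction fuel generalizing pos with
  | zero => omega
  | succ fuel ih =>
    rw [show snFindLoop s mask pos (fuel + 1) =
        (if PySem.Chars.findFrom mask targetMask (pos : Int) none = -1 then []
         else String.ofList (PySem.List.slice s
             (some (PySem.Chars.findFrom mask targetMask (pos : Int) none))
             (some (PySem.Chars.findFrom mask targetMask (pos : Int) none +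
               (EXAMPLE_SN.length : Int)))) ::
           snFindLoop s mask
             ((PySem.Chars.findFrom mask targetMask (pos : Int) none).toNat + 1) fuel)
      from rfl]
    by_cases hj : PySem.Chars.findFrom mask targetMask (pos : Int) none = -1
    · rw [if_pos hj]
      rw [PySem.Chars.findFrom_natCast_eq_neg_one_iff mask targetMask pos hpos] at hj
      symm
      rw [List.map_eq_nil_iff, List.filter_eq_nil_iff]
      intro i hi hm
      rw [List.mem_range'] at hi
      obtain ⟨k, hk, rfl⟩ := hi
      simp only [decide_eq_true_eq] at hm
      apply hj
      have hdd : mask.drop (pos + 1 * k) = (mask.drop pos).drop k := by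
        rw [List.drop_drop]; congr 1; omega
      rw [hdd] at hm
      exact prefix_drop_infix hm
    · rw [if_neg hj]
      obtain ⟨hle, hpre, hmin⟩ :=
        PySem.Chars.findFrom_natCast_spec mask targetMask pos hpos hj
      set j := PySem.Chars.findFrom mask targetMask (pos : Int) none with hjdef
      have hj0 : (0 : Int) ≤ j := le_trans (by exact_mod_cast Nat.zero_le pos) hle
      set jn := j.toNat with hjn
      have hjcast : j = (jn : Int) := (Int.toNat_of_nonneg hj0).symm
      have hposj : pos ≤ jn := by omega
      have hjlen : jn + 29 ≤ mask.length := by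
        have h1 := hpre.length_le
        have h2 : targetMask.length = 29 := by decide
        simp only [h2, List.length_drop] at h1
        omega
      have hsplit : List.range' pos (mask.length - pos) =
          List.range' pos (jn - pos) ++ jn :: List.range' (jn + 1) (mask.length - (jn + 1)) := by
        have h2 := List.range'_append (s := pos) (m := jn - pos) (n := mask.length - jn) (step := 1)
        rw [show pos + 1 * (jn - pos) = jn by omega] at h2
        rw [show mask.length - pos = (jn - pos) + (mask.length - jn) by omega, ← h2]
        congr 1
        rw [show mask.length - jn = (mask.length - (jn + 1)) + 1 by omega, List.range'_succ]
      rw [hsplit]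
      have hfilter1 : (List.range' pos (jn - pos)).filter
          (fun i => decide (targetMask <+: mask.drop i)) = [] := by
        rw [List.filter_eq_nil_iff]
        intro i hi
        rw [List.mem_range'] at hi
        obtain ⟨k, hk, rfl⟩ := hi
        simp only [decide_eq_true_eq]
        exact hmin (pos + 1 * k) (by omega) (by omega)
      rw [List.filter_append, hfilter1, List.nil_append, List.filter_cons,
        if_pos (by simpa using hpre)]
      simp only [List.map_cons]
      have hhead : String.ofList (PySem.List.slice s (some j)
          (some (j + (EXAMPLE_SN.length : Int)))) = sliceStr s jn := by
        rw [hjcast]; rfl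
      rw [hhead, ih (jn + 1) (by omega) (by omega)]

-- ===== VERDICT (by name: the statement is the Claim_ definition above) =====
theorem build_sn_list_spec : Claim_equal_build_sn_list := by
  intro in_str _
  unfold Spec_build_sn_list
  rw [build_sn_list_eq_filter]
  rw [show build_sn_list_alt in_str =
      snFindLoop in_str.toList (in_str.toList.map classifyChar) 0 (in_str.toList.length + 1)
    from rfl]
  rw [snFindLoop_eq _ _ 0 _ (Nat.zero_le _) (by simp)]
  simp [List.range_eq_range']
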